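-- pv_equiv track=rewrite | github.com/hbazille/adventofcode | 2022/d8p2.py | gen_mat
-- ===== SOURCE A (Python) =====
-- def gen_mat(lines):
--     M = []
--     G = []
--     i = 0
--     for line in lines[:-1]:
--         M.append([])
--         G.append([])
--         for c in line[:-1]:
--             M[i].append(int(c))
--             G[i].append(False)
--         i += 1
--     return M, G
-- ===== SOURCE B (Python) =====
-- def _row(line):
--     if len(line) <= 1:
--         return [], []
--     m, g = _row(line[1:])
--     return [int(line[0])] + m, [False] + g
--
-- def _rows(ls):
--     if len(ls) <= 1:
--         return [], []
--     m, g = _row(ls[0])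
--     M, G = _rows(ls[1:])
--     return [m] + M, [g] + G
--
-- def gen_mat(lines):
--     return _rows(lines)
-- ===== Notes on version B (the rewrite author's own statement) =====
-- stated objective: alternative
-- what changed: B is structurally recursive: it builds both matrices by recursion on the list of lines (and on the characters of each line), using the 'one element left' base case to drop the last line/character, instead of A's imperative loop over explicit [:-1] slices with a manual row counter i and per-index appends.
import Mathlib
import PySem

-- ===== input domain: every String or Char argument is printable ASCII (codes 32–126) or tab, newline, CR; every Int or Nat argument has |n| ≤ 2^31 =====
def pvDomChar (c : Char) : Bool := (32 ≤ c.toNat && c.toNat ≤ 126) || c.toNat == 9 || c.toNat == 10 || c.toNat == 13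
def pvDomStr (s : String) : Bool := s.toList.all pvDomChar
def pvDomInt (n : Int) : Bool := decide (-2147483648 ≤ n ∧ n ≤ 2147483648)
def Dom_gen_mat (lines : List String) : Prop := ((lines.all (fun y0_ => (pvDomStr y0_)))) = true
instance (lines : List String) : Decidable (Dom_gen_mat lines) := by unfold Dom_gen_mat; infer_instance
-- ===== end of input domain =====

-- B builds both matrices by structural recursion on lines/characters (base case 'one left' drops the last), instead of A's imperative loop over [:-1] slices with a row counter; same return value.

-- int(c) for a single character c (Pre_ guarantees c is a digit, where Python returns)
def pvDigit (c : Char) : Int := (PySem.Int.ofChars? [c]).getD 0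

-- ===== PORT A =====
-- A's outer loop state is (M, G, i); M[i].append / G[i].append are List.set at index i.
def gen_mat (lines : List String) : List (List Int) × List (List Bool) :=
  let st := (PySem.List.slice lines none (some (-1))).foldl
    (fun (st : List (List Int) × List (List Bool) × Int) line =>
      let M := st.1 ++ [[]]
      let G := st.2.1 ++ [[]]
      let i := st.2.2
      let p := (PySem.List.slice line.toList none (some (-1))).foldl
        (fun (p : List (List Int) × List (List Bool)) c =>
          (p.1.set i.toNat ((p.1.getD i.toNat []) ++ [pvDigit c]),
           p.2.set i.toNat ((p.2.getD i.toNat []) ++ [false])))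
        (M, G)
      (p.1, p.2, i + 1))
    ([], [], 0)
  (st.1, st.2.1)

-- ===== PORT B =====
-- _row: recursion on the characters; 'len(line) <= 1' is the [] / [_] base cases.
def pvRowAlt : List Char → List Int × List Bool
  | [] => ([], [])
  | [_] => ([], [])
  | c :: rest =>
    let p := pvRowAlt rest
    (pvDigit c :: p.1, false :: p.2)

-- _rows: recursion on the lines.
def pvRowsAlt : List String → List (List Int) × List (List Bool)
  | [] => ([], [])
  | [_] => ([], [])
  | l :: rest =>
    let mg := pvRowAlt l.toList
    let MG := pvRowsAlt rest
    (mg.1 :: MG.1, mg.2 :: MG.2)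

def gen_mat_alt (lines : List String) : List (List Int) × List (List Bool) :=
  pvRowsAlt lines

-- ===== PRECONDITION & SPEC =====
-- Pre_ excludes exactly the inputs where Python's int(c) raises ValueError (a non-digit
-- character in line[:-1] of some line in lines[:-1]); both A and B raise there.
def Pre_gen_mat (lines : List String) : Prop :=
  (lines.dropLast.all (fun line => line.toList.dropLast.all (fun c => c.isDigit))) = true
instance (lines : List String) : Decidable (Pre_gen_mat lines) := by unfold Pre_gen_mat; infer_instance
def pvWitness_gen_mat : List String := ["12", "34", "5"]

def Spec_gen_mat (lines : List String) (out : List (List Int) × List (List Bool)) : Prop := out = gen_mat_alt lines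
instance (lines : List String) (out : List (List Int) × List (List Bool)) : Decidable (Spec_gen_mat lines out) := by unfold Spec_gen_mat; infer_instance

-- ===== CLAIM (what is proved, stated in full; the proofs are below) =====
def Claim_equal_gen_mat : Prop := ∀ (lines : List String), Dom_gen_mat lines → Pre_gen_mat lines → Spec_gen_mat lines (gen_mat lines)

-- ===== LEMMAS AND PROOFS =====

-- inner character loop of A: appending to row i when i points at the freshly added last rows
lemma inner_loop (cs : List Char) (M : List (List Int)) (G : List (List Bool))
    (r : List Int) (g : List Bool) (hG : G.length = M.length) :
    cs.foldl
      (fun (p : List (List Int) × List (List Bool)) c =>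
        (p.1.set M.length ((p.1.getD M.length []) ++ [pvDigit c]),
         p.2.set M.length ((p.2.getD M.length []) ++ [false])))
      (M ++ [r], G ++ [g])
    = (M ++ [r ++ cs.map pvDigit], G ++ [g ++ List.replicate cs.length false]) := by
  induction cs generalizing r g with
  | nil => simp
  | cons c cs ih =>
    simp only [List.foldl_cons]
    have h1 : (M ++ [r]).getD M.length [] = r := by
      simp [List.getD]
    have h2 : (G ++ [g]).getD M.length [] = g := by
      simp [List.getD, ← hG]
    have h3 : (M ++ [r]).set M.length (r ++ [pvDigit c]) = M ++ [r ++ [pvDigit c]] := by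
      rw [List.set_append_right _ _ (le_refl _)]; simp
    have h4 : (G ++ [g]).set M.length (g ++ [false]) = G ++ [g ++ [false]] := by
      rw [← hG, List.set_append_right _ _ (le_refl _)]; simp
    rw [h1, h2, h3, h4, ih _ _]
    simp [List.replicate_succ]

-- outer loop invariant of A
lemma outer_loop (ls : List String) (M : List (List Int)) (G : List (List Bool))
    (hG : G.length = M.length) :
    ls.foldl
      (fun (st : List (List Int) × List (List Bool) × Int) line =>
        let M := st.1 ++ [[]]
        let G := st.2.1 ++ [[]]
        let i := st.2.2
        let p := (PySem.List.slice line.toList none (some (-1))).foldl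
          (fun (p : List (List Int) × List (List Bool)) c =>
            (p.1.set i.toNat ((p.1.getD i.toNat []) ++ [pvDigit c]),
             p.2.set i.toNat ((p.2.getD i.toNat []) ++ [false])))
          (M, G)
        (p.1, p.2, i + 1))
      (M, G, (M.length : Int))
    = (M ++ ls.map (fun line => (PySem.List.slice line.toList none (some (-1))).map pvDigit),
       G ++ ls.map (fun line => List.replicate (PySem.List.slice line.toList none (some (-1))).length false),
       (M.length : Int) + ls.length) := by
  induction ls generalizing M G with
  | nil => simp
  | cons line ls ih =>
    simp only [List.foldl_cons]
    have hi : ((M.length : Int)).toNat = M.length := by simp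
    have := inner_loop (PySem.List.slice line.toList none (some (-1))) M G [] [] hG
    simp only [hi, this, List.nil_append]
    have hG' : (G ++ [List.replicate (PySem.List.slice line.toList none (some (-1))).length false]).length
        = (M ++ [(PySem.List.slice line.toList none (some (-1))).map pvDigit]).length := by
      simp [hG]
    have hlen : ((M ++ [(PySem.List.slice line.toList none (some (-1))).map pvDigit]).length : Int)
        = (M.length : Int) + 1 := by simp
    rw [← hlen, ih _ _ hG']
    simp [List.map_cons, List.append_assoc]
    omega

-- characterisation of B's inner recursion
lemma pvRowAlt_eq (cs : List Char) :
    pvRowAlt cs = (cs.dropLast.map pvDigit, List.replicate cs.dropLast.length false) := by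
  induction cs with
  | nil => simp [pvRowAlt]
  | cons c rest ih =>
    cases rest with
    | nil => simp [pvRowAlt]
    | cons d t =>
      simp [pvRowAlt, ih, List.replicate_succ]

-- characterisation of B's outer recursion
lemma pvRowsAlt_eq (ls : List String) :
    pvRowsAlt ls = (ls.dropLast.map (fun l => l.toList.dropLast.map pvDigit),
                    ls.dropLast.map (fun l => List.replicate l.toList.dropLast.length false)) := by
  induction ls with
  | nil => simp [pvRowsAlt]
  | cons l rest ih =>
    cases rest with
    | nil => simp [pvRowsAlt]
    | cons m t =>
      simp [pvRowsAlt, ih, pvRowAlt_eq]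

-- ===== VERDICT (by name: the statement is the Claim_ definition above) =====
theorem gen_mat_spec : Claim_equal_gen_mat := by
  intro lines _ _
  show gen_mat lines = gen_mat_alt lines
  unfold gen_mat gen_mat_alt
  have h := outer_loop (PySem.List.slice lines none (some (-1))) [] [] rfl
  simp only [List.length_nil, Nat.cast_zero, List.nil_append, PySem.List.slice_to_neg_one] at h
  simp only [PySem.List.slice_to_neg_one, h, pvRowsAlt_eq]
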